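-- pv_equiv track=rewrite | github.com/ThisLimn0/OpenWilly | tools/willy_re/willy_re/lingo/listparser.py | _detect_property
-- ===== SOURCE A (Python) =====
-- def _detect_property(s: str) -> bool:
--     """Check if a segment looks like a property entry (e.g., #key:value or 1:value)."""
--     if not s:
--         return False
--     first = s[0]
--     if first == "#" or first.isdigit():
--         for ch in s[1:]:
--             if ch == ":":
--                 return True
--             if ch in ("[", "#", "]", ","):
--                 return False
--     return False
-- ===== SOURCE B (Python) =====
-- def _detect_property(s: str) -> bool:
--     if not s:
--         return False
--     if not (s[0] == "#" or s[0].isdigit()):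
--         return False
--     head, sep, _ = s[1:].partition(":")
--     if not sep:
--         return False
--     return not any(d in head for d in "[#],")
-- ===== Notes on version B (the rewrite author's own statement) =====
-- stated objective: idiomatic
-- what changed: Replaces the character-by-character scanning state machine with str.partition at the first colon followed by membership tests for each delimiter in the part before the colon.
import Mathlib
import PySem

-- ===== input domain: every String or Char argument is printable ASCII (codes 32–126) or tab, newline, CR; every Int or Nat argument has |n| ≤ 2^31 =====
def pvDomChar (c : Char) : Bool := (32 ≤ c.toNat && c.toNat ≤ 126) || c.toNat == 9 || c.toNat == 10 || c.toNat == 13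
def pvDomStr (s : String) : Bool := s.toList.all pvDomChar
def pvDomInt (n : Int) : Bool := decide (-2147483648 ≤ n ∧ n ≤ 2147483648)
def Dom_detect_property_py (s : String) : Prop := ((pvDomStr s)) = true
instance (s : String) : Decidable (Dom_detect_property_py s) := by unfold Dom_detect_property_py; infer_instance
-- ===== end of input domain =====

-- B replaces A's character-scanning state machine by partition-at-colon plus per-delimiter membership tests (idiomatic; same cost).

-- ===== PORT A =====
-- the for-loop over s[1:] with early returns
def detectLoopA : List Char → Bool
  | [] => false
  | ch :: cs =>
    if ch = ':' then true
    else if ch = '[' ∨ ch = '#' ∨ ch = ']' ∨ ch = ',' then false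
    else detectLoopA cs

def detect_property_py (s : String) : Bool :=
  match s.toList with
  | [] => false
  | first :: rest =>
    if first = '#' ∨ PySem.Chars.isdigit first then detectLoopA rest
    else false

-- ===== PORT B =====
-- Source B's `s[1:].partition(":")` ported by hand: head = chars before the first ':',
-- sep nonempty iff ':' occurs (exact for a single-character separator).
def detectScanB (rest : List Char) : Bool :=
  let head := rest.takeWhile (fun ch => ch ≠ ':')
  if rest.contains ':' then
    ['[', '#', ']', ','].all (fun d => ! head.contains d)
  else false

def detect_property_py_alt (s : String) : Bool :=
  match s.toList with
  | [] => false
  | first :: rest =>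
    if first = '#' ∨ PySem.Chars.isdigit first then detectScanB rest
    else false

-- ===== PRECONDITION & SPEC =====
def Spec_detect_property_py (s : String) (out : Bool) : Prop := out = detect_property_py_alt s
instance (s : String) (out : Bool) : Decidable (Spec_detect_property_py s out) := by unfold Spec_detect_property_py; infer_instance

-- ===== CLAIM (what is proved, stated in full; the proofs are below) =====
def Claim_equal_detect_property_py : Prop := ∀ (s : String), Dom_detect_property_py s → Spec_detect_property_py s (detect_property_py s)

-- ===== LEMMAS AND PROOFS =====
theorem detectLoopA_eq_scanB : ∀ rest : List Char, detectLoopA rest = detectScanB rest := by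
  intro rest
  induction rest with
  | nil => rfl
  | cons c cs ih =>
    by_cases hc : c = ':'
    · subst hc; simp [detectLoopA, detectScanB]
    · by_cases hd : c = '[' ∨ c = '#' ∨ c = ']' ∨ c = ','
      · rcases hd with h | h | h | h <;> subst h <;>
          simp [detectLoopA, detectScanB, List.takeWhile]
      · push_neg at hd
        obtain ⟨h1, h2, h3, h4⟩ := hd
        simp [detectLoopA, detectScanB, List.takeWhile, hc, h1, h2, h3, h4,
          Ne.symm hc, Ne.symm h1, Ne.symm h2, Ne.symm h3, Ne.symm h4, ih]

-- ===== VERDICT (by name: the statement is the Claim_ definition above) =====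
theorem detect_property_py_spec : Claim_equal_detect_property_py := by
  intro s _
  unfold Spec_detect_property_py detect_property_py detect_property_py_alt
  cases s.toList with
  | nil => rfl
  | cons first rest =>
    simp only [detectLoopA_eq_scanB]
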